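-- pv_equiv track=rewrite | github.com/prathamdesai13/SortsNsuch | RandyDandyProblems.py | sherlockIsValid
-- ===== SOURCE A (Python) =====
-- def sherlockIsValid(s):
--     """
--     A string s is considered valid iff all the chars in s appear
--     the same number of times or it is possible to remove one char
--     at one index in s and then all the chars appear the same number
--     of times.
--     Ex. s = 'abc' => {a : 1, b : 1, c : 1} => s is valid
--     """
--     freq = {}
--
--     for c in s:
--         if c in freq:
--             freq[c] += 1
--         else:
--             freq[c] = 1
--
--     m = min(freq.values())
--     M = max(freq.values())
--
--     # all chars appear the same amount of times
--     if m == M: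
--         return 'YES'
--     else:
--
--         num_min = num_max = 0
--
--         for c in freq:
--             if freq[c] == m:
--                 num_min += 1
--             elif freq[c] == M:
--                 num_max += 1
--             else:
--                 return 'NO'
--
--         if num_max == 1 and M - m == 1:
--             return 'YES'
--         elif num_min == 1 and m == 1:
--             return 'YES'
--
--         return 'NO'
-- ===== SOURCE B (Python) =====
-- def sherlockIsValid(s):
--     freq = {}
--     for c in s:
--         freq[c] = freq.get(c, 0) + 1
--     hist = {}
--     for v in freq.values():
--         hist[v] = hist.get(v, 0) + 1
--     if len(hist) <= 1:
--         return 'YES'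
--     if len(hist) > 2:
--         return 'NO'
--     a, b = sorted(hist)
--     if hist[b] == 1 and b == a + 1:
--         return 'YES'
--     if hist[a] == 1 and a == 1:
--         return 'YES'
--     return 'NO'
-- ===== Notes on version B (the rewrite author's own statement) =====
-- stated objective: idiomatic
-- what changed: B replaces A's min/max computation plus a classification loop with early exit by a frequency-of-frequencies histogram: it counts how often each character frequency occurs and decides directly from the (at most two) sorted distinct frequency values.
import Mathlib
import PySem

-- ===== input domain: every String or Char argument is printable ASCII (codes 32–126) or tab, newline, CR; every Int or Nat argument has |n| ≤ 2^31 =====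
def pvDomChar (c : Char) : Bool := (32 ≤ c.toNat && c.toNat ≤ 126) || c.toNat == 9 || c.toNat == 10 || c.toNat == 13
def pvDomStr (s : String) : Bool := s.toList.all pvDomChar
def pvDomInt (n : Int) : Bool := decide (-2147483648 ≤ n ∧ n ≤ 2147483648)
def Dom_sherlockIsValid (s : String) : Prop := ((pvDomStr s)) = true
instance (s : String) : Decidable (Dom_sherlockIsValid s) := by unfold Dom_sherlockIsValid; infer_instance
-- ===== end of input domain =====

-- B replaces A's min/max + classification loop by a histogram of the frequency values
-- (a frequency-of-frequencies dict) and a decision on its (at most two) sorted keys; same cost, plainer.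

-- ===== PORT A =====
-- freq build: 'if c in freq: freq[c] += 1 else: freq[c] = 1'
def sherlockBuildA (cs : List Char) : PySem.Dict Char Int :=
  cs.foldl (fun d c => if d.contains c then d.modify c 0 (· + 1) else d.insert c 1) PySem.Dict.empty

-- 'for c in freq: …' with early return 'NO', then the final two tests
def sherlockLoopA (freq : PySem.Dict Char Int) (m M : Int) : List Char → Int → Int → String
  | [], nmin, nmax =>
      if nmax == 1 && M - m == 1 then "YES"
      else if nmin == 1 && m == 1 then "YES"
      else "NO"
  | c :: rest, nmin, nmax =>
      if freq.getD c 0 == m then sherlockLoopA freq m M rest (nmin + 1) nmax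
      else if freq.getD c 0 == M then sherlockLoopA freq m M rest nmin (nmax + 1)
      else "NO"

-- 'm = min(freq.values()); M = max(freq.values())' and the branch on m == M
def sherlockFinishA (freq : PySem.Dict Char Int) : String :=
  match PySem.List.min? freq.values (fun v => v), PySem.List.max? freq.values (fun v => v) with
  | some m, some M =>
      if m == M then "YES"
      else sherlockLoopA freq m M freq.keys 0 0
  | _, _ => ""   -- Python: min() of an empty dict raises ValueError; excluded by Pre_

def sherlockIsValid (s : String) : String :=
  sherlockFinishA (sherlockBuildA s.toList)

-- ===== PORT B =====
-- the decision on the frequency histogram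
def sherlockDecideB (hist : PySem.Dict Int Int) : String :=
  if hist.size ≤ 1 then "YES"
  else if 2 < hist.size then "NO"
  else
    match PySem.List.sorted hist.keys (fun x => x) false with
    | [a, b] =>
        if hist.getD b 0 == 1 && b == a + 1 then "YES"
        else if hist.getD a 0 == 1 && a == 1 then "YES"
        else "NO"
    | _ => "NO"  -- unreachable: hist.size = 2 here ('a, b = sorted(hist)')

def sherlockIsValid_alt (s : String) : String :=
  sherlockDecideB
    ((s.toList.foldl (fun d c => d.insert c (d.getD c 0 + 1)) PySem.Dict.empty).values.foldl
      (fun d v => d.insert v (d.getD v 0 + 1)) PySem.Dict.empty)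

-- ===== PRECONDITION & SPEC =====
-- Pre_ excludes only the empty string, on which A's min() raises ValueError.
def Pre_sherlockIsValid (s : String) : Prop := s ≠ ""
instance (s : String) : Decidable (Pre_sherlockIsValid s) := by unfold Pre_sherlockIsValid; infer_instance
def pvWitness_sherlockIsValid : String := "aab"

def Spec_sherlockIsValid (s : String) (out : String) : Prop := out = sherlockIsValid_alt s
instance (s : String) (out : String) : Decidable (Spec_sherlockIsValid s out) := by unfold Spec_sherlockIsValid; infer_instance

-- ===== CLAIM (what is proved, stated in full; the proofs are below) =====
def Claim_equal_sherlockIsValid : Prop := ∀ (s : String), Dom_sherlockIsValid s → Pre_sherlockIsValid s → Spec_sherlockIsValid s (sherlockIsValid s)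

-- ===== LEMMAS AND PROOFS =====

-- A's freq build is Counter(s)
lemma sherlockBuildA_eq_counter (cs : List Char) : sherlockBuildA cs = PySem.Dict.counter cs := by
  unfold sherlockBuildA PySem.Dict.counter
  congr 1
  funext d c
  by_cases h : d.contains c
  · simp [h]
  · simp [h, PySem.Dict.modify, PySem.Dict.getD_of_not_contains]

-- the values-level version of A's classification loop
def sherlockLoopV (m M : Int) : List Int → Int → Int → String
  | [], nmin, nmax =>
      if nmax == 1 && M - m == 1 then "YES"
      else if nmin == 1 && m == 1 then "YES"
      else "NO"
  | v :: rest, nmin, nmax =>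
      if v == m then sherlockLoopV m M rest (nmin + 1) nmax
      else if v == M then sherlockLoopV m M rest nmin (nmax + 1)
      else "NO"

lemma sherlockLoopA_eq_loopV (freq : PySem.Dict Char Int) (m M : Int) :
    ∀ (ks : List Char) (nmin nmax : Int),
      sherlockLoopA freq m M ks nmin nmax
        = sherlockLoopV m M (ks.map (fun c => freq.getD c 0)) nmin nmax := by
  intro ks
  induction ks with
  | nil => intro _ _; rfl
  | cons c rest ih =>
      intro nmin nmax
      simp only [List.map_cons, sherlockLoopA, sherlockLoopV]
      split_ifs <;> first | exact ih _ _ | rfl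

lemma sherlockLoopV_spec (m M : Int) (hmM : m ≠ M) :
    ∀ (vs : List Int) (nmin nmax : Int),
      sherlockLoopV m M vs nmin nmax
        = if ∀ v ∈ vs, v = m ∨ v = M then
            (if nmax + vs.count M == 1 && M - m == 1 then "YES"
             else if nmin + vs.count m == 1 && m == 1 then "YES"
             else "NO")
          else "NO" := by
  intro vs
  induction vs with
  | nil => intro nmin nmax; simp [sherlockLoopV]
  | cons v rest ih =>
      intro nmin nmax
      have hiff : (∀ x ∈ v :: rest, x = m ∨ x = M) ↔ (v = m ∨ v = M) ∧ (∀ x ∈ rest, x = m ∨ x = M) := by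
        simp
      simp only [sherlockLoopV]
      by_cases hall : ∀ x ∈ rest, x = m ∨ x = M
      · by_cases hv : v = m
        · subst hv
          rw [if_pos (by simp), ih, if_pos hall, if_pos (hiff.2 ⟨Or.inl rfl, hall⟩)]
          have h2 : (v :: rest).count M = rest.count M := by
            simp [List.count_cons]; omega
          have h1 : ((v :: rest).count v : Int) = (rest.count v : Int) + 1 := by
            simp
          rw [h2, h1]
          have : nmin + 1 + (rest.count v : Int) = nmin + ((rest.count v : Int) + 1) := by ring
          rw [this]
        · rw [if_neg (by simpa using hv)]
          by_cases hV : v = M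
          · subst hV
            rw [if_pos (by simp), ih, if_pos hall, if_pos (hiff.2 ⟨Or.inr rfl, hall⟩)]
            have h2 : (v :: rest).count m = rest.count m := by
              simp [List.count_cons]; omega
            have h1 : ((v :: rest).count v : Int) = (rest.count v : Int) + 1 := by
              simp
            rw [h2, h1]
            have : nmax + 1 + (rest.count v : Int) = nmax + ((rest.count v : Int) + 1) := by ring
            rw [this]
          · rw [if_neg (by simpa using hV), if_neg (by simp [hv, hV])]
      · have hnall : ¬ ∀ x ∈ v :: rest, x = m ∨ x = M := fun h => hall (hiff.1 h).2
        rw [if_neg hnall]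
        split_ifs with hv hV
        · rw [ih, if_neg hall]
        · rw [ih, if_neg hall]
        · rfl

-- a Nodup list whose elements all lie in a two-element set has length ≤ 2
lemma nodup_two_vals {l : List Int} {m M : Int} (hnd : l.Nodup)
    (h : ∀ x ∈ l, x = m ∨ x = M) : l.length ≤ 2 := by
  have hsub : l ⊆ [m, M] := by
    intro x hx; rcases h x hx with h | h <;> simp [h]
  have := (List.subperm_of_subset hnd hsub).length_le
  simpa using this

lemma nodup_one_val {l : List Int} {m : Int} (hnd : l.Nodup)
    (h : ∀ x ∈ l, x = m) : l.length ≤ 1 := by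
  have hsub : l ⊆ [m] := by intro x hx; simp [h x hx]
  have := (List.subperm_of_subset hnd hsub).length_le
  simpa using this

-- ===== VERDICT =====
theorem sherlockIsValid_spec : Claim_equal_sherlockIsValid := by
  intro s _hdom hpre
  unfold Spec_sherlockIsValid
  have hcs : s.toList ≠ [] := by
    intro h
    exact hpre (by cases s; simp_all)
  -- name the shared data
  set cs := s.toList with hcsdef
  have hA : sherlockBuildA cs = PySem.Dict.counter cs := sherlockBuildA_eq_counter cs
  set D := PySem.Dict.counter cs with hD
  set vals := D.values with hvals
  have hvalsne : vals ≠ [] := by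
    have : D.keys ≠ [] := by
      rw [hD, PySem.Dict.keys_counter]
      intro h
      rcases List.exists_mem_of_ne_nil _ hcs with ⟨c, hc⟩
      have : c ∈ PySem.Set.ofList cs := (PySem.Set.mem_ofList _ _).2 hc
      simp [h] at this
    intro h
    apply this
    have := congrArg List.length h
    simp only [hvals] at this
    have hk : D.keys.length = D.values.length := by
      simp [PySem.Dict.keys, PySem.Dict.values]
    cases hkk : D.keys with
    | nil => exact hkk ▸ rfl
    | cons a t => simp [hkk] at hk; simp at this; simp_all
  have hndk : D.keys.Nodup := by rw [hD]; exact PySem.Dict.nodup_keys_counter cs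
  -- B's freq is the same counter, B's hist is counter of vals
  have hBfreq : cs.foldl (fun d c => d.insert c (d.getD c 0 + 1)) PySem.Dict.empty = D := by
    rw [hD]; exact PySem.Dict.foldl_insert_getD_add_one_eq_counter cs
  unfold sherlockIsValid sherlockIsValid_alt
  rw [hA, hBfreq]
  have hhist : vals.foldl (fun d v => d.insert v (d.getD v 0 + 1)) PySem.Dict.empty = PySem.Dict.counter vals :=
    PySem.Dict.foldl_insert_getD_add_one_eq_counter vals
  rw [hhist]
  unfold sherlockFinishA sherlockDecideB
  set H := PySem.Dict.counter vals with hH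
  have hHkeys : H.keys = PySem.Set.ofList vals := PySem.Dict.keys_counter vals
  have hHsize : H.size = (PySem.Set.ofList vals).length := by
    have : H.size = H.keys.length := by simp [PySem.Dict.size, PySem.Dict.keys]
    rw [this, hHkeys]
  have hHgetD : ∀ v, H.getD v 0 = vals.count v := fun v => PySem.Dict.getD_counter vals v
  have hSnd : (PySem.Set.ofList vals).Nodup := PySem.Set.nodup_ofList vals
  -- min/max of a nonempty list
  obtain ⟨v0, t0, hv0⟩ := List.exists_cons_of_ne_nil hvalsne
  cases hmin : PySem.List.min? vals (fun v => v) with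
  | none => exact absurd ((PySem.List.min?_eq_none_iff _ _).1 hmin) hvalsne
  | some m =>
  cases hmax : PySem.List.max? vals (fun v => v) with
  | none => exact absurd ((PySem.List.max?_eq_none_iff _ _).1 hmax) hvalsne
  | some M =>
  simp only []
  have hmmem : m ∈ vals := PySem.List.min?_mem hmin
  have hMmem : M ∈ vals := PySem.List.max?_mem hmax
  have hmle : ∀ y ∈ vals, m ≤ y := PySem.List.min?_isMin hmin
  have hMge : ∀ y ∈ vals, y ≤ M := PySem.List.max?_isMax hmax
  by_cases hmM : m = M
  · -- all values equal: distinct count ≤ 1, both return YES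
    subst hmM
    have hall : ∀ x ∈ PySem.Set.ofList vals, x = m := by
      intro x hx
      have hx' : x ∈ vals := (PySem.Set.mem_ofList _ _).1 hx
      exact le_antisymm (hMge x hx') (hmle x hx')
    have hlen : (PySem.Set.ofList vals).length ≤ 1 := nodup_one_val hSnd hall
    simp only [beq_self_eq_true, if_true]
    rw [if_pos (by omega : H.size ≤ 1)]
  · -- m ≠ M : distinct count ≥ 2
    have hmS : m ∈ PySem.Set.ofList vals := (PySem.Set.mem_ofList _ _).2 hmmem
    have hMS : M ∈ PySem.Set.ofList vals := (PySem.Set.mem_ofList _ _).2 hMmem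
    have hlen2 : 2 ≤ (PySem.Set.ofList vals).length := by
      by_contra hlt
      push Not at hlt
      interval_cases h : (PySem.Set.ofList vals).length
      · simp [List.length_eq_zero_iff] at h; simp [h] at hmS
      · rcases List.length_eq_one_iff.1 h with ⟨a, ha⟩
        rw [ha] at hmS hMS
        simp at hmS hMS
        exact hmM (hmS.trans hMS.symm)
    rw [if_neg (by simpa using hmM)]
    rw [if_neg (by omega : ¬ H.size ≤ 1)]
    -- A's loop over keys = values-level loop
    rw [sherlockLoopA_eq_loopV]
    have hkv : D.keys.map (fun c => D.getD c 0) = vals := by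
      rw [hvals, PySem.Dict.values_eq_map_keys D hndk 0]
    rw [hkv, sherlockLoopV_spec m M hmM]
    have hmltM : m < M := lt_of_le_of_ne (hmle M hMmem) hmM
    by_cases h2 : (PySem.Set.ofList vals).length = 2
    · -- exactly two distinct values: they are m and M
      have hsub : ([m, M] : List Int) ⊆ PySem.Set.ofList vals := by
        intro y hy
        rcases (by simpa using hy : y = m ∨ y = M) with h | h
        · exact h ▸ hmS
        · exact h ▸ hMS
      have hperm : ([m, M] : List Int).Perm (PySem.Set.ofList vals) :=
        (List.subperm_of_subset (by simp [hmM]) hsub).perm_of_length_le (by simp; omega)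
      have hall2 : ∀ v ∈ vals, v = m ∨ v = M := by
        intro v hv
        have : v ∈ ([m, M] : List Int) := hperm.symm.subset ((PySem.Set.mem_ofList _ _).2 hv)
        simpa using this
      rw [if_pos hall2]
      rw [if_neg (by omega : ¬ 2 < H.size)]
      have hsorted : PySem.List.sorted H.keys (fun x => x) false = [m, M] := by
        rw [hHkeys]
        apply PySem.List.sorted_eq_of_perm_of_pairwise_lt
        · exact hperm
        · simp [hmltM]
      rw [hsorted]
      simp only []
      rw [hHgetD, hHgetD]
      have hc : (M - m == 1) = (M == m + 1) := by
        by_cases h : M = m + 1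
        · simp [h]
        · have h' : M - m ≠ 1 := by omega
          simp [h, h']
      rw [hc]
      simp only [zero_add]
    · -- three or more distinct values: both return NO
      have hex : ¬ ∀ v ∈ vals, v = m ∨ v = M := by
        intro hall
        have hall' : ∀ x ∈ PySem.Set.ofList vals, x = m ∨ x = M := fun x hx =>
          hall x ((PySem.Set.mem_ofList _ _).1 hx)
        have := nodup_two_vals hSnd hall'
        omega
      rw [if_neg hex, if_pos (by omega : 2 < H.size)]
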